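-- pv_equiv track=rewrite | github.com/graphbrain/graphbrain | graphbrain/utils/permutations.py | get_from_perm_pos
-- ===== SOURCE A (Python) =====
-- def get_from_perm_pos(str_array, pos):
-- 	j = 0;
-- 	for i in range(0, len(str_array)):
-- 		if str_array[i] != None:
-- 			if (j == pos):
-- 				res = str_array[i]
-- 				str_array[i] = None
-- 				return res
-- 			j += 1
-- 	# this should not happen
-- 	return None
-- ===== SOURCE B (Python) =====
-- def get_from_perm_pos(str_array, pos):
--     # table-build pass: indices of the non-None entries, then direct positional lookup
--     present = [i for i, x in enumerate(str_array) if x != None]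
--     if 0 <= pos < len(present):
--         idx = present[pos]
--         res = str_array[idx]
--         str_array[idx] = None
--         return res
--     return None
-- ===== Notes on version B (the rewrite author's own statement) =====
-- stated objective: alternative
-- what changed: replaces the fused count-non-None-with-early-exit scan by first building the index table of non-None entries and then doing one direct positional lookup
import Mathlib
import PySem

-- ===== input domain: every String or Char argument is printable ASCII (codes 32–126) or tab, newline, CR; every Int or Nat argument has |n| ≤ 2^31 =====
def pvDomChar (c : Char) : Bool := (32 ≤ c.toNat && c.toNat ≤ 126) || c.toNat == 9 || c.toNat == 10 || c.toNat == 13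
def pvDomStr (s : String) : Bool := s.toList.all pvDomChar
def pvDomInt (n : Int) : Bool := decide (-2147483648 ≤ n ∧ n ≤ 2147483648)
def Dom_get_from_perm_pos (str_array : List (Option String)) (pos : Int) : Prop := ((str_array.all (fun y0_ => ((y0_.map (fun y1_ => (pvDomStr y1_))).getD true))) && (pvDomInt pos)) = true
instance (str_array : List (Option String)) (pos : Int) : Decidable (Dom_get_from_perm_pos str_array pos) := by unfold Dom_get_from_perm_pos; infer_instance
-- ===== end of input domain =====

-- B replaces A's fused count-with-early-exit scan by a table of non-None indices plus one
-- positional lookup (alternative decomposition, same cost); A and B perform the identical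
-- in-place mutation of str_array, and the theorems here are about the return value.


-- ===== PORT A =====
-- A's loop over range(len(str_array)) with the running counter j and early return,
-- transcribed as structural recursion carrying j.
def pvLoopA : List (Option String) → Int → Int → Option String
  | [], _, _ => none
  | x :: rest, pos, j =>
    if x ≠ none then
      (if j = pos then x else pvLoopA rest pos (j + 1))
    else pvLoopA rest pos j

def get_from_perm_pos (str_array : List (Option String)) (pos : Int) : Option String :=
  pvLoopA str_array pos 0

-- ===== PORT B =====
-- Source B: present = [i for i, x in enumerate(str_array) if x != None]; guarded direct lookup.
-- idx comes from enumerate, hence idx ≥ 0, so plain Nat indexing after toNat is exact here.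
def get_from_perm_pos_alt (str_array : List (Option String)) (pos : Int) : Option String :=
  let present : List Int :=
    ((PySem.List.enumerate str_array 0).filter (fun p => p.2.isSome)).map (fun p => p.1)
  if 0 ≤ pos ∧ pos < (present.length : Int) then
    match present[pos.toNat]? with
    | some idx =>
      match str_array[idx.toNat]? with
      | some res => res
      | none => none   -- unreachable: idx is a valid index of str_array
    | none => none     -- unreachable: pos is in range of present
  else none

-- ===== PRECONDITION & SPEC =====
def Spec_get_from_perm_pos (str_array : List (Option String)) (pos : Int) (out : Option String) : Prop := out = get_from_perm_pos_alt str_array pos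
instance (str_array : List (Option String)) (pos : Int) (out : Option String) : Decidable (Spec_get_from_perm_pos str_array pos out) := by unfold Spec_get_from_perm_pos; infer_instance

-- ===== CLAIM (what is proved, stated in full; the proofs are below) =====
def Claim_equal_get_from_perm_pos : Prop := ∀ (str_array : List (Option String)) (pos : Int), Dom_get_from_perm_pos str_array pos → Spec_get_from_perm_pos str_array pos (get_from_perm_pos str_array pos)

-- ===== LEMMAS AND PROOFS =====

-- common reference value: the pos-th element of the sublist of non-None entries
def pvRef (xs : List (Option String)) (p : Int) : Option String :=
  if 0 ≤ p then ((xs.filter Option.isSome)[p.toNat]?).join else none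

-- the index table, with arbitrary enumerate start
def pvP (xs : List (Option String)) (s : Int) : List Int :=
  ((PySem.List.enumerate xs s).filter (fun p => p.2.isSome)).map (fun p => p.1)

theorem pvP_nil (s : Int) : pvP [] s = [] := by
  simp [pvP, PySem.List.enumerate_nil]

theorem pvP_cons (x : Option String) (xs : List (Option String)) (s : Int) :
    pvP (x :: xs) s = (if x.isSome then [s] else []) ++ pvP xs (s + 1) := by
  cases x <;> simp [pvP, PySem.List.enumerate_cons]

theorem pvP_cons0 (x : Option String) (xs : List (Option String)) :
    pvP (x :: xs) 0 = (if x.isSome then [0] else []) ++ pvP xs 1 := by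
  simpa using pvP_cons x xs 0

theorem pvP_shift (xs : List (Option String)) (s : Int) :
    pvP xs s = (pvP xs 0).map (fun i => i + s) := by
  induction xs generalizing s with
  | nil => simp [pvP_nil]
  | cons x t ih =>
      rw [pvP_cons, pvP_cons0, ih (s + 1), ih 1]
      cases h : x.isSome <;> simp [List.map_map] <;> exact fun a _ => by omega

theorem pvP_nonneg {xs : List (Option String)} {i : Int} (h : i ∈ pvP xs 0) : 0 ≤ i := by
  induction xs generalizing i with
  | nil => simp [pvP_nil] at h
  | cons x t ih =>
      rw [pvP_cons0, pvP_shift t 1] at h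
      rcases List.mem_append.1 h with h1 | h2
      · cases hx : x.isSome <;> simp [hx] at h1; omega
      · rcases List.mem_map.1 h2 with ⟨j, hj, rfl⟩
        have := ih hj; omega

-- B's lookup equals the reference value, for natural positions
theorem pvB_lookup (xs : List (Option String)) (k : Nat) :
    (match (pvP xs 0)[k]? with
     | some idx => (match xs[idx.toNat]? with | some res => res | none => none)
     | none => none) = ((xs.filter Option.isSome)[k]?).join := by
  induction xs generalizing k with
  | nil => simp [pvP_nil]
  | cons x t ih =>
      rw [pvP_cons0, pvP_shift t 1]
      cases hx : x.isSome with
      | false =>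
          simp only [hx, Bool.false_eq_true, if_false, List.nil_append, List.getElem?_map,
            List.filter_cons, Bool.false_eq_true]
          cases h : (pvP t 0)[k]? with
          | none =>
              have := ih k
              simp [h] at this ⊢
              exact this
          | some j =>
              have hj0 : 0 ≤ j := pvP_nonneg (List.mem_of_getElem? h)
              have ht : (j + 1).toNat = j.toNat + 1 := by omega
              have := ih k
              simp [h, ht] at this ⊢
              exact this
      | true =>
          simp only [hx, if_true, List.singleton_append, List.filter_cons]
          cases k with
          | zero =>
              cases x with
              | none => simp at hx
              | some s => simp
          | succ k =>
              simp only [List.getElem?_cons_succ, List.getElem?_map]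
              cases h : (pvP t 0)[k]? with
              | none =>
                  have := ih k
                  simp [h] at this ⊢
                  exact this
              | some j =>
                  have hj0 : 0 ≤ j := pvP_nonneg (List.mem_of_getElem? h)
                  have ht : (j + 1).toNat = j.toNat + 1 := by omega
                  have := ih k
                  simp [h, ht] at this ⊢
                  exact this

theorem pvP_length (xs : List (Option String)) :
    (pvP xs 0).length = (xs.filter Option.isSome).length := by
  induction xs with
  | nil => simp [pvP_nil]
  | cons x t ih =>
      rw [pvP_cons0, pvP_shift t 1]
      cases hx : x.isSome <;> simp [List.filter, hx, ih]

theorem pvAlt_eq_ref (xs : List (Option String)) (p : Int) :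
    get_from_perm_pos_alt xs p = pvRef xs p := by
  have e : get_from_perm_pos_alt xs p =
      (if 0 ≤ p ∧ p < ((pvP xs 0).length : Int) then
        (match (pvP xs 0)[p.toNat]? with
         | some idx => (match xs[idx.toNat]? with | some res => res | none => none)
         | none => none)
      else none) := rfl
  rw [e]
  unfold pvRef
  by_cases h0 : 0 ≤ p
  · by_cases hl : p < ((pvP xs 0).length : Int)
    · rw [if_pos ⟨h0, hl⟩, if_pos h0, pvB_lookup]
    · rw [if_neg (by tauto), if_pos h0]
      have : (xs.filter Option.isSome).length ≤ p.toNat := by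
        have := pvP_length xs; omega
      simp [List.getElem?_eq_none this]
  · rw [if_neg (by tauto), if_neg h0]

-- A's loop computes the reference value at relative position pos - j
theorem pvLoopA_eq_ref (xs : List (Option String)) (pos j : Int) :
    pvLoopA xs pos j = pvRef xs (pos - j) := by
  induction xs generalizing j with
  | nil => simp [pvLoopA, pvRef]
  | cons x t ih =>
      cases x with
      | none => simpa [pvLoopA, pvRef, List.filter] using ih j
      | some s =>
          by_cases he : j = pos
          · subst he
            simp [pvLoopA, pvRef, List.filter]
          · have h1 : pvLoopA (some s :: t) pos j = pvLoopA t pos (j + 1) := by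
              simp [pvLoopA, he]
            rw [h1, ih (j + 1)]
            unfold pvRef
            by_cases h0 : 0 ≤ pos - j
            · have h0' : 0 ≤ pos - (j + 1) := by omega
              rw [if_pos h0, if_pos h0']
              have : (pos - j).toNat = (pos - (j + 1)).toNat + 1 := by omega
              rw [this]
              simp [List.filter]
            · rw [if_neg h0, if_neg (by omega)]

-- ===== VERDICT (by name: the statement is the Claim_ definition above) =====
theorem get_from_perm_pos_spec : Claim_equal_get_from_perm_pos := by
  intro xs pos _
  unfold Spec_get_from_perm_pos get_from_perm_pos
  rw [pvAlt_eq_ref, pvLoopA_eq_ref]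
  norm_num
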